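-- pv_equiv track=rewrite | github.com/sco1/adventofcode | 2020/Day_18/aoc_2020_day18.py | parenthesizer
-- ===== SOURCE A (Python) =====
-- def parenthesizer(equation: str) -> str:
--     """
--     Transform the provided equation so it mimics following the advanced math operator precedence.
--
--     For advanced math, addition is evaluated before multiplication.
--     """
--     # To fake the new operator precedence without actually doing operator precedence in the
--     # calculation function, we can add layers of parentheses into the equation to adjust contexts
--     # in order to get the precedence we want
--     new_equation = ["(("]  # Assume equations start with an integer
--
--     for char in equation:
--         # Parentheses still have highest precedence, so they become the deepest scope
--         if char == "(":
--             new_equation.append("(((")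
--         elif char == ")":
--             new_equation.append(")))")
--         # Addition has higher precedence than multiplication, so its scope sits on top
--         elif char == "+":
--             new_equation.append(")+(")
--         elif char == "*":
--             new_equation.append("))*((")
--         # Otherwise, we have the digits
--         else:
--             new_equation.append(char)
--
--     new_equation.append("))")
--     return "".join(new_equation)
-- ===== SOURCE B (Python) =====
-- def parenthesizer(equation: str) -> str:
--     """Insert parentheses encoding advanced precedence via whole-string replacements."""
--     # Replace parens first so parens inserted by the +/* replacements are not re-expanded.
--     transformed = (
--         equation.replace("(", "(((")
--         .replace(")", ")))")
--         .replace("+", ")+(")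
--         .replace("*", "))*((")
--     )
--     return "((" + transformed + "))"
-- ===== Notes on version B (the rewrite author's own statement) =====
-- stated objective: faster
-- what changed: Replaces A's per-character loop that appends pieces to a list with a fixed two-paren prefix/suffix around four whole-string str.replace passes (parentheses replaced first so inserted ones are never re-expanded); the C-level replace scans beat the Python-level loop.
import Mathlib
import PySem

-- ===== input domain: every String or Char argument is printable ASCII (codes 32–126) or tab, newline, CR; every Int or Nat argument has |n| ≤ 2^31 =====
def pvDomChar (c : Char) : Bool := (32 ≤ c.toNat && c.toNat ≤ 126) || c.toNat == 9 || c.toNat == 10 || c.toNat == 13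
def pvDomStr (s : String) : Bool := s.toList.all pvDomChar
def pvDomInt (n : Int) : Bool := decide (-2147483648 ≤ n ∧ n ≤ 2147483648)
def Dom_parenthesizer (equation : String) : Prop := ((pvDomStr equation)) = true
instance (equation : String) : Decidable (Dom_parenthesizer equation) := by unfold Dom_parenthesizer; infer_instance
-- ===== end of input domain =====

-- B replaces A's per-character loop by a fixed prefix/suffix and four whole-string
-- str.replace passes (measured faster at the checked sizes); same return value on every input.

-- ===== PORT A =====
-- literal transliteration: build a list of string pieces, one per character, then "".join
def parenthesizer (equation : String) : String :=
  let newEquation : List String := ["(("]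
  let newEquation := equation.toList.foldl (fun acc char =>
    if char = '(' then acc ++ ["((("]
    else if char = ')' then acc ++ [")))"]
    else if char = '+' then acc ++ [")+("]
    else if char = '*' then acc ++ ["))*(("]
    else acc ++ [String.ofList [char]]) newEquation
  let newEquation := newEquation ++ ["))"]
  PySem.Str.join "" newEquation

-- ===== PORT B =====
-- literal transliteration of Source B: four chained str.replace calls, then prefix/suffix
def parenthesizer_alt (equation : String) : String :=
  let transformed :=
    PySem.Str.replace
      (PySem.Str.replace
        (PySem.Str.replace
          (PySem.Str.replace equation "(" "(((")
          ")" ")))")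
        "+" ")+(")
      "*" "))*(("
  "((" ++ transformed ++ "))"

-- ===== PRECONDITION & SPEC =====
def Spec_parenthesizer (equation : String) (out : String) : Prop := out = parenthesizer_alt equation
instance (equation : String) (out : String) : Decidable (Spec_parenthesizer equation out) := by unfold Spec_parenthesizer; infer_instance

-- ===== CLAIM (what is proved, stated in full; the proofs are below) =====
def Claim_equal_parenthesizer : Prop := ∀ (equation : String), Dom_parenthesizer equation → Spec_parenthesizer equation (parenthesizer equation)

-- ===== LEMMAS AND PROOFS =====

-- replace with a single-character pattern is a per-character flatMap
theorem replace_go_single (c : Char) (new : List Char) :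
    ∀ (fuel : Nat) (l acc : List Char), l.length ≤ fuel →
      PySem.Chars.replace.go [c] new fuel l acc =
        acc.reverse ++ l.flatMap (fun x => if x = c then new else [x]) := by
  intro fuel
  induction fuel with
  | zero =>
    intro l acc h
    have : l = [] := List.length_eq_zero_iff.mp (Nat.le_zero.mp h)
    subst this
    simp [PySem.Chars.replace.go]
  | succ n ih =>
    intro l acc h
    cases l with
    | nil => simp [PySem.Chars.replace.go]
    | cons x t =>
      simp only [PySem.Chars.replace.go]
      by_cases hx : x = c
      · subst hx
        have hpre : List.isPrefixOf [x] (x :: t) = true := by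
          simp [List.isPrefixOf]
        rw [if_pos hpre]
        have ht : t.length ≤ n := by simpa using Nat.succ_le_succ_iff.mp h
        rw [show List.drop (List.length [x]) (x :: t) = t by simp]
        rw [ih t (new.reverse ++ acc) ht]
        simp
      · have hpre : List.isPrefixOf [c] (x :: t) = false := by
          simp [List.isPrefixOf]
          intro hc; exact absurd hc.symm hx
        rw [if_neg (by simp [hpre])]
        have ht : t.length ≤ n := by simpa using Nat.succ_le_succ_iff.mp h
        rw [ih t (x :: acc) ht]
        simp [hx]

theorem replace_single (s : List Char) (c : Char) (new : List Char) :
    PySem.Chars.replace s [c] new = s.flatMap (fun x => if x = c then new else [x]) := by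
  simp only [PySem.Chars.replace, List.isEmpty_cons, Bool.false_eq_true, if_false]
  exact replace_go_single c new s.length s [] (le_refl _)

theorem join_empty_sep (parts : List (List Char)) :
    PySem.Chars.join [] parts = parts.flatten := by
  induction parts with
  | nil => simp [PySem.Chars.join_nil]
  | cons p rest ih =>
    cases rest with
    | nil => simp [PySem.Chars.join_singleton]
    | cons q r =>
      rw [PySem.Chars.join_cons_cons]
      simp [ih]

-- the per-character expansion A performs (on the list-of-chars level)
def pvExpand (x : Char) : List Char :=
  if x = '(' then "(((".toList
  else if x = ')' then ")))".toList
  else if x = '+' then ")+(".toList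
  else if x = '*' then "))*((".toList
  else [x]

-- composing the four single-char replacements equals A's one-pass expansion
theorem four_replaces_eq_expand (l : List Char) :
    ((((l.flatMap (fun x => if x = '(' then "(((".toList else [x])).flatMap
        (fun x => if x = ')' then ")))".toList else [x])).flatMap
        (fun x => if x = '+' then ")+(".toList else [x])).flatMap
        (fun x => if x = '*' then "))*((".toList else [x])) = l.flatMap pvExpand := by
  induction l with
  | nil => simp
  | cons x t ih =>
    simp only [List.flatMap_cons, List.flatMap_append] at *
    rw [ih]
    congr 1
    by_cases h1 : x = '('
    · subst h1; decide
    by_cases h2 : x = ')'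
    · subst h2; decide
    by_cases h3 : x = '+'
    · subst h3; decide
    by_cases h4 : x = '*'
    · subst h4; decide
    simp [pvExpand, h1, h2, h3, h4]

-- ===== VERDICT (by name: the statement is the Claim_ definition above) =====
theorem parenthesizer_spec : Claim_equal_parenthesizer := by
  intro equation _
  unfold Spec_parenthesizer parenthesizer parenthesizer_alt
  apply String.toList_inj.mp
  dsimp only
  -- A side: the foldl collects one piece per char, join "" flattens them
  have hfun : (fun (acc : List String) char =>
      if char = '(' then acc ++ ["((("]
      else if char = ')' then acc ++ [")))"]
      else if char = '+' then acc ++ [")+("]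
      else if char = '*' then acc ++ ["))*(("]
      else acc ++ [String.ofList [char]]) =
    (fun acc char => acc ++ [if char = '(' then ("(((" : String)
      else if char = ')' then ")))"
      else if char = '+' then ")+("
      else if char = '*' then "))*(("
      else String.ofList [char]]) := by
    funext acc c
    split_ifs <;> rfl
  rw [hfun]
  rw [PySem.List.foldl_append_singleton_eq_map
    (fun char => if char = '(' then ("(((" : String)
      else if char = ')' then ")))"
      else if char = '+' then ")+("
      else if char = '*' then "))*(("
      else String.ofList [char])]
  rw [PySem.Str.toList_join]
  have hsep : ("" : String).toList = ([] : List Char) := rfl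
  rw [hsep, join_empty_sep]
  -- B side: each replace is a single-char flatMap
  simp only [String.toList_append, PySem.Str.toList_replace]
  rw [show ("(" : String).toList = ['('] from rfl, show (")" : String).toList = [')'] from rfl,
    show ("+" : String).toList = ['+'] from rfl, show ("*" : String).toList = ['*'] from rfl]
  rw [replace_single, replace_single, replace_single, replace_single]
  rw [four_replaces_eq_expand]
  -- both sides are now prefix ++ per-char expansion ++ suffix
  rw [List.map_append, List.map_append, List.flatten_append, List.flatten_append,
    List.flatMap_def, List.map_map]
  congr 3
  apply List.map_congr_left
  intro x _
  by_cases h1 : x = '('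
  · subst h1; rfl
  by_cases h2 : x = ')'
  · subst h2; rfl
  by_cases h3 : x = '+'
  · subst h3; rfl
  by_cases h4 : x = '*'
  · subst h4; rfl
  simp [pvExpand, h1, h2, h3, h4]
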